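-- pv_equiv track=rewrite | github.com/chris-henry-holland/Portfolio | Python_projects/Pygame_Projects/General_tools/buttons.py | simplifyReferences
-- ===== SOURCE A (Python) =====
-- from typing import Union, Tuple, List, Set, Dict, Optional, Callable, Any
--
-- def simplifyReferences(tup: Tuple[Any]) -> None:
--     n = len(tup)
--     res = list(tup)
--     remain = set(range(n))
--     def recur(idx: int) -> None:
--         remain.remove(idx)
--         if res[idx] is None or not isinstance(res[idx], int):
--             return
--         if res[idx] in remain:
--             recur(res[idx])
--         idx2 = res[idx]
--         if isinstance(res[idx2], int) or res[idx2] is None: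
--             res[idx] = res[idx2]
--         return
--
--     while remain:
--         recur(next(iter(remain)))
--     return tuple(res)
-- ===== SOURCE B (Python) =====
-- def simplifyReferences(tup):
--     # Iterative re-implementation: explicit worklist stack doing post-order DFS
--     # instead of recursion.
--     res = list(tup)
--     remain = set(range(len(res)))
--     while remain:
--         stack = [("visit", next(iter(remain)), 0)]
--         while stack:
--             tag, idx, v = stack.pop()
--             if tag == "visit":
--                 remain.discard(idx)
--                 v = res[idx]
--                 if v is None or not isinstance(v, int):
--                     continue
--                 stack.append(("apply", idx, v))
--                 if v in remain:
--                     stack.append(("visit", v, 0))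
--             else:
--                 t = res[v]
--                 if isinstance(t, int) or t is None:
--                     res[idx] = t
--     return tuple(res)
-- ===== Notes on version B (the rewrite author's own statement) =====
-- stated objective: alternative
-- what changed: Replaces A's recursive helper (with a closure mutating res/remain) by an iterative worklist: an explicit stack of visit/apply frames doing post-order DFS over the reference chains.
import Mathlib
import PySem

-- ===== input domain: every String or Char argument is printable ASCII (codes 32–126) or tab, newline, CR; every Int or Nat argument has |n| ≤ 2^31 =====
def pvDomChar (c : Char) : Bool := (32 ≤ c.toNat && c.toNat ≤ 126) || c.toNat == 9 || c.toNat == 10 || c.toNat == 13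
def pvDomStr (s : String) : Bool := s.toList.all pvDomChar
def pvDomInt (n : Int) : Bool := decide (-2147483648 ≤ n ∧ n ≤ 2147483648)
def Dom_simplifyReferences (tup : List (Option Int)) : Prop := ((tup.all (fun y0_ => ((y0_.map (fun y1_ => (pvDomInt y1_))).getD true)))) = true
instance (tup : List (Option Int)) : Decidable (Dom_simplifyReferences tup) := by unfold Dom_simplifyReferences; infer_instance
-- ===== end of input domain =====

-- B replaces A's recursive helper by an explicit worklist stack doing post-order DFS
-- (objective: alternative decomposition, same O(n) cost; return value only — A builds a fresh list).

-- ===== PORT A =====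
-- A's `recur`: `remain.remove(idx)` = erase; reads/writes via pyGet? / set.
-- Fuel `k` bounds the recursion depth; every call removes an element of `remain`
-- before recursing, so `remain.length` fuel is always sufficient (the 0 case is unreachable).
def pvRecurA (k : Nat) (idx : Int) (res : List (Option Int)) (remain : List Int) :
    List (Option Int) × List Int :=
  match k with
  | 0 => (res, remain)
  | k + 1 =>
    let remain1 := remain.erase idx                    -- remain.remove(idx)
    match PySem.List.pyGet? res idx with
    | none => (res, remain1)                           -- unreachable: idx is always a valid index
    | some none => (res, remain1)                      -- res[idx] is None: return
    | some (some v) =>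
      let pr := if v ∈ remain1 then pvRecurA k v res remain1 else (res, remain1)
      match PySem.List.pyGet? pr.1 idx with            -- idx2 = res[idx], re-read after the recursion
      | some (some idx2) =>
        match PySem.List.pyGet? pr.1 idx2 with         -- res[idx2]; none = IndexError (outside Pre_)
        | none => (pr.1, pr.2)
        | some t => (pr.1.set idx.toNat t, pr.2)       -- res[idx] = res[idx2] (guard is always true for Option Int; idx ≥ 0 here)
      | _ => (pr.1, pr.2)                              -- unreachable: res[idx] is still the int v

-- `while remain: recur(next(iter(remain)))`.  `remain` is `set(range(n))` with elements only
-- ever removed, so CPython's set iteration order is ascending and `next(iter(remain))` is the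
-- head of the (sorted) list.  Each iteration removes ≥ 1 element, so fuel n suffices.
def pvLoopA (fuel : Nat) (res : List (Option Int)) (remain : List Int) : List (Option Int) :=
  match fuel, remain with
  | 0, _ => res
  | _, [] => res
  | f + 1, idx :: _ =>
    let pr := pvRecurA remain.length idx res remain
    pvLoopA f pr.1 pr.2

def simplifyReferences (tup : List (Option Int)) : List (Option Int) :=
  pvLoopA tup.length tup ((List.range tup.length).map Int.ofNat)

-- ===== PORT B =====
inductive PVFrame where
  | visit : Int → PVFrame
  | apply : Int → Int → PVFrame
deriving DecidableEq, Repr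

-- B's inner `while stack:` loop; `none` = fuel exhausted (never happens with the fuel
-- `pvLoopB` supplies: each visit removes an element of `remain` and costs ≤ 2 steps).
def pvRun (fuel : Nat) (res : List (Option Int)) (remain : List Int) (stack : List PVFrame) :
    Option (List (Option Int) × List Int) :=
  match stack with
  | [] => some (res, remain)
  | frame :: rest =>
    match fuel with
    | 0 => none
    | f + 1 =>
      match frame with
      | .visit idx =>
        let remain1 := remain.erase idx                -- remain.discard(idx)
        match PySem.List.pyGet? res idx with
        | none => pvRun f res remain1 rest             -- unreachable: idx is always a valid index
        | some none => pvRun f res remain1 rest        -- v is None: continue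
        | some (some v) =>                             -- push apply, then (post-order) the target
          pvRun f res remain1
            (if v ∈ remain1 then .visit v :: .apply idx v :: rest else .apply idx v :: rest)
      | .apply idx v =>
        match PySem.List.pyGet? res v with             -- t = res[v]; none = IndexError (outside Pre_)
        | none => pvRun f res remain rest
        | some t => pvRun f (res.set idx.toNat t) remain rest   -- res[idx] = t (guard always true)

-- B's outer `while remain:` loop; start = next(iter(remain)) = head (see pvLoopA's comment).
def pvLoopB (fuel : Nat) (res : List (Option Int)) (remain : List Int) : List (Option Int) :=
  match fuel, remain with
  | 0, _ => res
  | _, [] => res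
  | f + 1, start :: _ =>
    match pvRun (2 * remain.length) res remain [.visit start] with
    | some pr => pvLoopB f pr.1 pr.2
    | none => res                                      -- unreachable: the fuel is sufficient

def simplifyReferences_alt (tup : List (Option Int)) : List (Option Int) :=
  pvLoopB tup.length tup ((List.range tup.length).map Int.ofNat)

-- ===== PRECONDITION & SPEC =====
-- Pre_ excludes exactly the inputs on which the Python A raises IndexError: some stored
-- integer is outside [-n, n).  (B raises there too; inside Pre_ negative values index from
-- the end, Python's rule, which both implementations follow via pyGet?.)
def Pre_simplifyReferences (tup : List (Option Int)) : Prop :=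
  ∀ v ∈ tup.reduceOption, -(tup.length : Int) ≤ v ∧ v < tup.length

instance (tup : List (Option Int)) : Decidable (Pre_simplifyReferences tup) := by
  unfold Pre_simplifyReferences; infer_instance

def pvWitness_simplifyReferences : List (Option Int) := [some 2, none, some (-3), some 1]

def Spec_simplifyReferences (tup : List (Option Int)) (out : List (Option Int)) : Prop :=
  out = simplifyReferences_alt tup
instance (tup : List (Option Int)) (out : List (Option Int)) : Decidable (Spec_simplifyReferences tup out) := by
  unfold Spec_simplifyReferences; infer_instance

-- ===== CLAIM (what is proved, stated in full; the proofs are below) =====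
def Claim_equal_simplifyReferences : Prop :=
  ∀ (tup : List (Option Int)), Dom_simplifyReferences tup → Pre_simplifyReferences tup →
    Spec_simplifyReferences tup (simplifyReferences tup)

-- ===== LEMMAS AND PROOFS =====

-- fuel monotonicity of the stack machine
theorem pvRun_succ (f : Nat) :
    ∀ res remain stack r, pvRun f res remain stack = some r →
      pvRun (f + 1) res remain stack = some r := by
  induction f with
  | zero =>
    intro res remain stack r h
    cases stack with
    | nil => simpa [pvRun] using h
    | cons fr rest => simp [pvRun] at h
  | succ f ih =>
    intro res remain stack r h
    cases stack with
    | nil => simpa [pvRun] using h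
    | cons fr rest =>
      cases fr with
      | visit idx =>
        simp only [pvRun] at h ⊢
        cases hg : PySem.List.pyGet? res idx with
        | none => rw [hg] at h; exact ih _ _ _ _ h
        | some c =>
          cases c with
          | none => rw [hg] at h; exact ih _ _ _ _ h
          | some v => rw [hg] at h; exact ih _ _ _ _ h
      | apply idx v =>
        simp only [pvRun] at h ⊢
        cases hg : PySem.List.pyGet? res v with
        | none => rw [hg] at h; exact ih _ _ _ _ h
        | some t => rw [hg] at h; exact ih _ _ _ _ h

theorem pvRun_mono {f g : Nat} (hfg : f ≤ g) :
    ∀ res remain stack r, pvRun f res remain stack = some r →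
      pvRun g res remain stack = some r := by
  induction g with
  | zero => intro res remain stack r h; have : f = 0 := Nat.le_zero.mp hfg; rwa [this] at h
  | succ g ih =>
    intro res remain stack r h
    rcases Nat.lt_or_ge f (g + 1) with hlt | hge
    · exact pvRun_succ g _ _ _ _ (ih (Nat.lt_succ_iff.mp hlt) _ _ _ _ h)
    · have : f = g + 1 := Nat.le_antisymm hfg hge
      rwa [this] at h

-- reading a list after setting a different (nonnegative) index
theorem pvGet_set_ne (res : List (Option Int)) (i : Nat) (t : Option Int) (j : Int)
    (hj : 0 ≤ j) (hne : j ≠ (i : Int)) :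
    PySem.List.pyGet? (res.set i t) j = PySem.List.pyGet? res j := by
  rw [PySem.List.pyGet?_of_nonneg (h := hj), PySem.List.pyGet?_of_nonneg (h := hj)]
  rw [List.getElem?_set_ne (by omega)]

-- pvRecurA only writes indices in {idx} ∪ remain
theorem pvRecurA_get_outside :
    ∀ (k : Nat) (idx : Int) (res : List (Option Int)) (remain : List Int) (j : Int),
      0 ≤ j → 0 ≤ idx → j ≠ idx → j ∉ remain → (∀ x ∈ remain, 0 ≤ x) →
      PySem.List.pyGet? (pvRecurA k idx res remain).1 j = PySem.List.pyGet? res j := by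
  intro k
  induction k with
  | zero => intro idx res remain j _ _ _ _ _; rfl
  | succ k ih =>
    intro idx res remain j hj hidx hji hjr hpos
    simp only [pvRecurA]
    cases hg : PySem.List.pyGet? res idx with
    | none => rfl
    | some c =>
      cases c with
      | none => rfl
      | some v =>
        by_cases hv : v ∈ remain.erase idx
        · simp only [if_pos hv]
          have hjv : j ≠ v := fun h => hjr (h ▸ List.mem_of_mem_erase hv)
          have hjr1 : j ∉ remain.erase idx := fun h => hjr (List.mem_of_mem_erase h)
          have hv0 : 0 ≤ v := hpos v (List.mem_of_mem_erase hv)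
          have hpos1 : ∀ x ∈ remain.erase idx, 0 ≤ x :=
            fun x hx => hpos x (List.mem_of_mem_erase hx)
          have hrec := ih v res (remain.erase idx) j hj hv0 hjv hjr1 hpos1
          cases h2 : PySem.List.pyGet? (pvRecurA k v res (remain.erase idx)).1 idx with
          | none => exact hrec
          | some c2 =>
            cases c2 with
            | none => exact hrec
            | some idx2 =>
              dsimp only
              cases h3 : PySem.List.pyGet? (pvRecurA k v res (remain.erase idx)).1 idx2 with
              | none => exact hrec
              | some t =>
                dsimp only
                rw [pvGet_set_ne _ _ _ _ hj (by omega), hrec]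
        · simp only [if_neg hv, hg]
          cases h3 : PySem.List.pyGet? res v with
          | none => rfl
          | some t => rw [pvGet_set_ne _ _ _ _ hj (by omega)]

-- pvRecurA only removes elements from remain
theorem pvRecurA_sublist :
    ∀ (k : Nat) (idx : Int) (res : List (Option Int)) (remain : List Int),
      idx ∈ remain → remain.length ≤ k →
      (pvRecurA k idx res remain).2.Sublist (remain.erase idx) := by
  intro k
  induction k with
  | zero =>
    intro idx res remain hmem hlen
    rw [List.length_eq_zero_iff.mp (Nat.le_zero.mp hlen)] at hmem
    exact absurd hmem (List.not_mem_nil)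
  | succ k ih =>
    intro idx res remain hmem hlen
    simp only [pvRecurA]
    cases hg : PySem.List.pyGet? res idx with
    | none => exact List.Sublist.refl _
    | some c =>
      cases c with
      | none => exact List.Sublist.refl _
      | some v =>
        by_cases hv : v ∈ remain.erase idx
        · simp only [if_pos hv]
          have hlen1 : (remain.erase idx).length ≤ k := by
            rw [List.length_erase_of_mem hmem]; omega
          have hsub : (pvRecurA k v res (remain.erase idx)).2.Sublist (remain.erase idx) :=
            ((ih v res (remain.erase idx) hv hlen1).trans List.erase_sublist)
          cases h2 : PySem.List.pyGet? (pvRecurA k v res (remain.erase idx)).1 idx with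
          | none => exact hsub
          | some c2 =>
            cases c2 with
            | none => exact hsub
            | some idx2 =>
              dsimp only
              cases h3 : PySem.List.pyGet? (pvRecurA k v res (remain.erase idx)).1 idx2 with
              | none => exact hsub
              | some t => exact hsub
        · simp only [if_neg hv, hg]
          cases h3 : PySem.List.pyGet? res v with
          | none => exact List.Sublist.refl _
          | some t => exact List.Sublist.refl _

-- one-step unfolding equations (definitional)
theorem pvRecurA_step (k : Nat) (idx : Int) (res : List (Option Int)) (remain : List Int) :
    pvRecurA (k + 1) idx res remain =
      (match PySem.List.pyGet? res idx with
       | none => (res, remain.erase idx)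
       | some none => (res, remain.erase idx)
       | some (some v) =>
         let pr := if v ∈ remain.erase idx then pvRecurA k v res (remain.erase idx)
                   else (res, remain.erase idx)
         match PySem.List.pyGet? pr.1 idx with
         | some (some idx2) =>
           match PySem.List.pyGet? pr.1 idx2 with
           | none => (pr.1, pr.2)
           | some t => (pr.1.set idx.toNat t, pr.2)
         | _ => (pr.1, pr.2)) := rfl

theorem pvRun_visit_step (f : Nat) (res : List (Option Int)) (remain : List Int)
    (idx : Int) (rest : List PVFrame) :
    pvRun (f + 1) res remain (PVFrame.visit idx :: rest) =
      (match PySem.List.pyGet? res idx with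
       | none => pvRun f res (remain.erase idx) rest
       | some none => pvRun f res (remain.erase idx) rest
       | some (some v) =>
         pvRun f res (remain.erase idx)
           (if v ∈ remain.erase idx then PVFrame.visit v :: PVFrame.apply idx v :: rest
            else PVFrame.apply idx v :: rest)) := rfl

theorem pvRun_apply_step (f : Nat) (res : List (Option Int)) (remain : List Int)
    (idx v : Int) (rest : List PVFrame) :
    pvRun (f + 1) res remain (PVFrame.apply idx v :: rest) =
      (match PySem.List.pyGet? res v with
       | none => pvRun f res remain rest
       | some t => pvRun f (res.set idx.toNat t) remain rest) := rfl

-- the simulation lemma: one recursive call of A = the corresponding stack segment of B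
theorem pvRun_visit :
    ∀ (k : Nat) (idx : Int) (res : List (Option Int)) (remain : List Int)
      (stack : List PVFrame) (fuel : Nat) (r : List (Option Int) × List Int),
      idx ∈ remain → remain.Nodup → (∀ x ∈ remain, 0 ≤ x) → remain.length ≤ k →
      pvRun fuel (pvRecurA k idx res remain).1 (pvRecurA k idx res remain).2 stack = some r →
      pvRun (fuel + 2 * remain.length) res remain (PVFrame.visit idx :: stack) = some r := by
  intro k
  induction k with
  | zero =>
    intro idx res remain stack fuel r hmem _ _ hlen _
    rw [List.length_eq_zero_iff.mp (Nat.le_zero.mp hlen)] at hmem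
    exact absurd hmem List.not_mem_nil
  | succ k ih =>
    intro idx res remain stack fuel r hmem hnd hpos hlen h
    have hm : 0 < remain.length := List.length_pos_of_mem hmem
    have hlen1 : (remain.erase idx).length = remain.length - 1 := List.length_erase_of_mem hmem
    have hpos1 : ∀ x ∈ remain.erase idx, 0 ≤ x := fun x hx => hpos x (List.mem_of_mem_erase hx)
    have hf : fuel + 2 * remain.length = (fuel + 2 * (remain.length - 1) + 1) + 1 := by omega
    rw [hf, pvRun_visit_step]
    rw [pvRecurA_step] at h
    cases hg : PySem.List.pyGet? res idx with
    | none =>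
      rw [hg] at h
      dsimp only at h ⊢
      refine pvRun_mono ?_ _ _ _ _ h; omega
    | some c =>
      cases c with
      | none =>
        rw [hg] at h
        dsimp only at h ⊢
        refine pvRun_mono ?_ _ _ _ _ h; omega
      | some v =>
        rw [hg] at h
        dsimp only at h ⊢
        by_cases hv : v ∈ remain.erase idx
        · rw [if_pos hv] at h ⊢
          have hvne : idx ≠ v := (((hnd.mem_erase_iff).mp hv).1).symm
          have hW : PySem.List.pyGet? (pvRecurA k v res (remain.erase idx)).1 idx
              = some (some v) :=
            (pvRecurA_get_outside k v res (remain.erase idx) idx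
              (hpos idx hmem) (hpos v (List.mem_of_mem_erase hv)) hvne
              (fun hin => (((hnd.mem_erase_iff).mp hin).1) rfl) hpos1).trans hg
          rw [hW] at h
          dsimp only at h
          have harith : fuel + 2 * (remain.length - 1) + 1
              = (fuel + 1) + 2 * (remain.erase idx).length := by rw [hlen1]; omega
          rw [harith]
          apply ih v res (remain.erase idx) (PVFrame.apply idx v :: stack) (fuel + 1) r hv
            (hnd.erase idx) hpos1 (by rw [hlen1]; omega)
          rw [pvRun_apply_step]
          cases h3 : PySem.List.pyGet? (pvRecurA k v res (remain.erase idx)).1 v with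
          | none => rw [h3] at h; dsimp only at h; exact h
          | some t => rw [h3] at h; dsimp only at h; exact h
        · rw [if_neg hv] at h ⊢
          rw [hg] at h
          dsimp only at h
          rw [pvRun_apply_step]
          cases h3 : PySem.List.pyGet? res v with
          | none =>
            rw [h3] at h
            dsimp only at h ⊢
            refine pvRun_mono ?_ _ _ _ _ h; omega
          | some t =>
            rw [h3] at h
            dsimp only at h ⊢
            refine pvRun_mono ?_ _ _ _ _ h; omega

theorem pvLoop_eq :
    ∀ (fuel : Nat) (res : List (Option Int)) (remain : List Int),
      remain.Nodup → (∀ x ∈ remain, 0 ≤ x) →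
      pvLoopA fuel res remain = pvLoopB fuel res remain := by
  intro fuel
  induction fuel with
  | zero => intro res remain _ _; rfl
  | succ f ih =>
    intro res remain hnd hpos
    cases remain with
    | nil => rfl
    | cons idx rest =>
      have hmem : idx ∈ idx :: rest := List.mem_cons_self
      have hsub : (pvRecurA (idx :: rest).length idx res (idx :: rest)).2.Sublist (idx :: rest) :=
        (pvRecurA_sublist _ idx res _ hmem (le_refl _)).trans List.erase_sublist
      have hrun : pvRun (0 + 2 * (idx :: rest).length) res (idx :: rest) [PVFrame.visit idx]
          = some (pvRecurA (idx :: rest).length idx res (idx :: rest)) :=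
        pvRun_visit (idx :: rest).length idx res (idx :: rest) [] 0 _ hmem hnd hpos
          (le_refl _) rfl
      rw [Nat.zero_add] at hrun
      simp only [pvLoopA, pvLoopB, hrun]
      exact ih _ _ (hnd.sublist hsub) (fun x hx => hpos x (hsub.subset hx))

-- ===== VERDICT (by name: the statement is the Claim_ definition above) =====
theorem simplifyReferences_spec : Claim_equal_simplifyReferences := by
  intro tup _ _
  unfold Spec_simplifyReferences simplifyReferences simplifyReferences_alt
  apply pvLoop_eq
  · exact List.Nodup.map (fun a b h => Int.ofNat.inj h) List.nodup_range
  · intro x hx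
    simp only [List.mem_map] at hx
    obtain ⟨i, _, rfl⟩ := hx
    exact Int.natCast_nonneg i
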